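-- pv_equiv track=rewrite | github.com/GDcraft07/python_unecon | contests/contest_2.py | number_2
-- ===== SOURCE A (Python) =====
-- from collections import defaultdict
-- from collections import defaultdict
-- from collections import defaultdict
--
-- def number_2(line):
--     letter_dict = defaultdict(int)
--     current_letter = line[0]
--     count = 0
--
--     for i in range(0, len(line)):
--         if current_letter == line[i]:
--             count += 1
--         else:
--             current_letter = line[i]
--             count = 1
--         if count > letter_dict[line[i]]:
--                 letter_dict[line[i]] = count
--     answer = ""
--     max_number = 0
--     for i in letter_dict:
--          if max_number < letter_dict[i]:
--               max_number = letter_dict[i]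
--
--     for i in letter_dict:
--          if letter_dict[i] == max_number:
--               answer += i
--
--     return (max_number, answer)
-- ===== SOURCE B (Python) =====
-- def number_2(line):
--     n = len(line)
--     best = {}
--     for c in dict.fromkeys(line):
--         lo, hi = 1, n
--         while lo < hi:
--             mid = (lo + hi + 1) // 2
--             if c * mid in line:
--                 lo = mid
--             else:
--                 hi = mid - 1
--         best[c] = lo
--     m = max(best.values())
--     return (m, ''.join(c for c in best if best[c] == m))
-- ===== Notes on version B (the rewrite author's own statement) =====
-- stated objective: alternative
-- what changed: B abandons run-scanning entirely: for each distinct character c it binary-searches the largest k with c*k a substring of the line (a monotone predicate checked by substring containment), instead of A's single left-to-right pass maintaining current-letter/count state.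
-- outside the precondition, e.g. on number_2(''): A raises IndexError, B raises ValueError
import Mathlib
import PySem

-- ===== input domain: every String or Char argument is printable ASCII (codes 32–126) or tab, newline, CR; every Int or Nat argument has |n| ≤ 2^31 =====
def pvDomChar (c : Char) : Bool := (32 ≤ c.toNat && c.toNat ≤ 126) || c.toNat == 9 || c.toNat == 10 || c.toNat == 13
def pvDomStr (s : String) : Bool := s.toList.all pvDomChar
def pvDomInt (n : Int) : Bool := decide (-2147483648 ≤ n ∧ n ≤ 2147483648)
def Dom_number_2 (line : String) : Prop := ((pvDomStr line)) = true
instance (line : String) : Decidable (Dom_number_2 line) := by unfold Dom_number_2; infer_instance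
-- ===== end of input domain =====

-- B replaces A's single left-to-right run-counting pass by a per-distinct-character binary search
-- for the largest k with c*k a substring of the line; objective: alternative (same results,
-- genuinely different algorithm). Equivalence is about the return value; nothing is mutated.

-- ===== PORT A =====
-- the for-loop over range(0, len(line)): state (current_letter, count, letter_dict).
-- defaultdict read letter_dict[line[i]] is modeled by getD _ 0: the key is always assigned at its
-- first occurrence in the very same iteration (count ≥ 1 > 0), so insertion order is unchanged.
def number2Loop : List Char → Char → Int → PySem.Dict Char Int → PySem.Dict Char Int
  | [], _, _, d => d
  | x :: rest, currentLetter, count, d =>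
      let count' := if currentLetter == x then count + 1 else 1
      let d' := if count' > d.getD x 0 then d.insert x count' else d
      number2Loop rest x count' d'

def number_2 (line : String) : Int × String :=
  match PySem.Str.pyGet? line 0 with
  | none => (0, "")   -- line[0] raises IndexError in Python; excluded by Pre_number_2
  | some c0 =>
    let d := number2Loop line.toList c0 0 PySem.Dict.empty
    let maxNumber := d.keys.foldl (fun m k => if m < d.getD k 0 then d.getD k 0 else m) 0
    let answer := d.keys.foldl (fun a k => if d.getD k 0 == maxNumber then a ++ [k] else a) ([] : List Char)
    (maxNumber, String.ofList answer)

-- ===== PORT B =====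
-- the while-loop: binary search on [lo, hi] for the largest k with c*k a substring of line
def bsearchRun (l : List Char) (c : Char) (lo hi : Int) : Int :=
  if lo < hi then   -- mid = (lo + hi + 1) // 2, written inline
    if PySem.Chars.isIn (PySem.List.pyRepeat [c] (PySem.Int.floordiv (lo + hi + 1) 2)) l then
      bsearchRun l c (PySem.Int.floordiv (lo + hi + 1) 2) hi
    else bsearchRun l c lo (PySem.Int.floordiv (lo + hi + 1) 2 - 1)
  else lo
termination_by (hi - lo).toNat
decreasing_by
  · have h2 := PySem.Int.floordiv_two_mid_bounds (lo := lo + 1) (hi := hi) (by omega)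
    have h3 : lo + 1 + hi = lo + hi + 1 := by ring
    rw [h3] at h2
    omega
  · have h2 := PySem.Int.floordiv_two_mid_bounds (lo := lo + 1) (hi := hi) (by omega)
    have h3 : lo + 1 + hi = lo + hi + 1 := by ring
    rw [h3] at h2
    omega

def number_2_alt (line : String) : Int × String :=
  let l := line.toList
  let n : Int := (l.length : Int)   -- len(line)
  let best := (PySem.List.dedup l).foldl
      (fun d c => d.insert c (bsearchRun l c 1 n)) PySem.Dict.empty
  match PySem.List.max? best.values (fun v => v) with
  | none => (0, "")   -- max() on an empty dict raises ValueError in Python; excluded by Pre_number_2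
  | some m => (m, String.ofList (best.keys.filter (fun c => best.getD c 0 == m)))

-- ===== PRECONDITION & SPEC =====
-- Pre_ excludes only the empty string, on which A raises IndexError (and B raises ValueError).
def Pre_number_2 (line : String) : Prop := line.toList ≠ []
instance (line : String) : Decidable (Pre_number_2 line) := by unfold Pre_number_2; infer_instance
def pvWitness_number_2 : String := "aabba"

def Spec_number_2 (line : String) (out : Int × String) : Prop := out = number_2_alt line
instance (line : String) (out : Int × String) : Decidable (Spec_number_2 line out) := by unfold Spec_number_2; infer_instance

-- ===== CLAIM (what is proved, stated in full; the proofs are below) =====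
def Claim_equal_number_2 : Prop := ∀ (line : String), Dom_number_2 line → Pre_number_2 line → Spec_number_2 line (number_2 line)

-- ===== LEMMAS AND PROOFS =====

-- the conditional max-update A's loop performs on the dict
def upd (d : PySem.Dict Char Int) (c : Char) (n : Int) : PySem.Dict Char Int :=
  if n > d.getD c 0 then d.insert c n else d

lemma getD_upd_self_ge (d : PySem.Dict Char Int) (c : Char) (n : Int) :
    n ≤ (upd d c n).getD c 0 := by
  unfold upd; split_ifs with h
  · simp [PySem.Dict.getD_insert_self]
  · omega

lemma upd_collapse (d : PySem.Dict Char Int) (c : Char) (m n : Int) (h : m ≤ n) :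
    upd (upd d c m) c n = upd d c n := by
  by_cases h1 : m > d.getD c 0
  · by_cases h2 : n > m
    · have hn : n > d.getD c 0 := by omega
      simp only [upd, if_pos h1, PySem.Dict.getD_insert_self, if_pos h2, if_pos hn,
        PySem.Dict.insert_insert_self]
    · have hmn : m = n := by omega
      subst hmn
      simp only [upd, if_pos h1, PySem.Dict.getD_insert_self, if_neg h2]
  · have hd : upd d c m = d := by simp only [upd, if_neg h1]
    rw [hd]

-- the maximal runs of line, in order: list of (letter, run length)
def number2Runs : List Char → List (Char × Int)
  | [] => []
  | c :: rest =>
      (c, 1 + ((rest.takeWhile (fun y => y == c)).length : Int)) ::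
        number2Runs (rest.dropWhile (fun y => y == c))
termination_by cs => cs.length
decreasing_by
  simp only [List.length_cons]
  exact Nat.lt_succ_of_le (List.length_dropWhile_le _ _)

-- A's loop, with a pending run of `count` copies of `currentLetter` merged into the runs of cs
def runsP (currentLetter : Char) (count : Int) (cs : List Char) : List (Char × Int) :=
  (currentLetter, count + ((cs.takeWhile (fun y => y == currentLetter)).length : Int)) ::
    number2Runs (cs.dropWhile (fun y => y == currentLetter))

lemma loop_eq_foldl : ∀ (cs : List Char) (cl : Char) (cnt : Int) (d : PySem.Dict Char Int),
    cnt ≤ d.getD cl 0 →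
    number2Loop cs cl cnt d = (runsP cl cnt cs).foldl (fun d p => upd d p.1 p.2) d := by
  intro cs
  induction cs with
  | nil =>
      intro cl cnt d h
      simp only [number2Loop, runsP, List.takeWhile_nil, List.length_nil, Nat.cast_zero,
        add_zero, List.dropWhile_nil, number2Runs, List.foldl_cons, List.foldl_nil, upd,
        if_neg (by omega : ¬ cnt > d.getD cl 0)]
  | cons x rest ih =>
      intro cl cnt d h
      by_cases hx : cl = x
      · subst hx
        have hstep : number2Loop (cl :: rest) cl cnt d
            = number2Loop rest cl (cnt + 1) (upd d cl (cnt + 1)) := by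
          simp [number2Loop, upd]
        rw [hstep, ih cl (cnt + 1) _ (getD_upd_self_ge d cl (cnt + 1))]
        have htw : (cl :: rest).takeWhile (fun y => y == cl)
            = cl :: rest.takeWhile (fun y => y == cl) :=
          List.takeWhile_cons_of_pos (by simp)
        have hdw : (cl :: rest).dropWhile (fun y => y == cl)
            = rest.dropWhile (fun y => y == cl) :=
          List.dropWhile_cons_of_pos (by simp)
        simp only [runsP, htw, hdw, List.length_cons, List.foldl_cons]
        rw [upd_collapse d cl (cnt + 1) _
          (by have := Int.natCast_nonneg ((rest.takeWhile (fun y => y == cl)).length); omega)]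
        have hval : cnt + 1 + ((rest.takeWhile (fun y => y == cl)).length : Int)
            = cnt + (((rest.takeWhile (fun y => y == cl)).length + 1 : Nat) : Int) := by
          push_cast; ring
        rw [hval]
      · have hbx : (cl == x) = false := by simp [hx]
        have hxb : (x == cl) = false := by simp [Ne.symm hx]
        have hstep : number2Loop (x :: rest) cl cnt d
            = number2Loop rest x 1 (upd d x 1) := by
          simp [number2Loop, hbx, upd]
        rw [hstep, ih x 1 _ (getD_upd_self_ge d x 1)]
        have htw : (x :: rest).takeWhile (fun y => y == cl) = [] :=
          List.takeWhile_cons_of_neg (by simp [hxb])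
        have hdw : (x :: rest).dropWhile (fun y => y == cl) = x :: rest :=
          List.dropWhile_cons_of_neg (by simp [hxb])
        simp only [runsP, htw, hdw, List.length_nil, Nat.cast_zero, add_zero,
          number2Runs, List.foldl_cons]
        rw [show upd d cl cnt = d from by
          simp only [upd, if_neg (by omega : ¬ cnt > d.getD cl 0)]]
        rw [upd_collapse d x 1 _
          (by have := Int.natCast_nonneg ((rest.takeWhile (fun y => y == x)).length); omega)]

lemma dicts_eq (c0 : Char) (rest : List Char) :
    number2Loop (c0 :: rest) c0 0 PySem.Dict.empty =
      (number2Runs (c0 :: rest)).foldl (fun d p => upd d p.1 p.2) PySem.Dict.empty := by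
  rw [loop_eq_foldl (c0 :: rest) c0 0 PySem.Dict.empty (by simp [PySem.Dict.getD_empty])]
  have htw : (c0 :: rest).takeWhile (fun y => y == c0)
      = c0 :: rest.takeWhile (fun y => y == c0) :=
    List.takeWhile_cons_of_pos (by simp)
  have hdw : (c0 :: rest).dropWhile (fun y => y == c0)
      = rest.dropWhile (fun y => y == c0) :=
    List.dropWhile_cons_of_pos (by simp)
  simp only [runsP, htw, hdw, List.length_cons, number2Runs]
  have hval : (0:Int) + (((rest.takeWhile (fun y => y == c0)).length + 1 : Nat) : Int)
      = 1 + ((rest.takeWhile (fun y => y == c0)).length : Int) := by push_cast; ring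
  rw [hval]

lemma runs_pos (cs : List Char) : ∀ p ∈ number2Runs cs, 1 ≤ p.2 := by
  induction cs using number2Runs.induct with
  | case1 => simp [number2Runs]
  | case2 c rest ih =>
      intro p hp
      rw [number2Runs] at hp
      rcases List.mem_cons.mp hp with h | h
      · subst h
        have := Int.natCast_nonneg ((rest.takeWhile (fun y => y == c)).length)
        simp only []
        omega
      · exact ih p h

-- running maximum of the run lengths recorded for c
def maxVal (c : Char) (m0 : Int) (l : List (Char × Int)) : Int :=
  l.foldl (fun m p => if p.1 = c then max m p.2 else m) m0

lemma getD_upd (d : PySem.Dict Char Int) (a : Char) (n : Int) (c : Char) :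
    (upd d a n).getD c 0 = if a = c then max (d.getD c 0) n else d.getD c 0 := by
  by_cases h : n > d.getD a 0
  · simp only [upd, if_pos h, PySem.Dict.getD_insert]
    by_cases hac : a = c
    · subst hac; simp [max_eq_right (le_of_lt h)]
    · rw [if_neg (fun hh => hac hh.symm), if_neg hac]
  · simp only [upd, if_neg h]
    by_cases hac : a = c
    · subst hac; rw [if_pos rfl, max_eq_left (by omega)]
    · rw [if_neg hac]

lemma getD_foldl_upd (ll : List (Char × Int)) (d : PySem.Dict Char Int) (c : Char) :
    (ll.foldl (fun d p => upd d p.1 p.2) d).getD c 0 = maxVal c (d.getD c 0) ll := by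
  induction ll generalizing d with
  | nil => rfl
  | cons p t ih =>
      simp only [List.foldl_cons, maxVal, ih, getD_upd]

lemma le_self_maxVal (c : Char) (m0 : Int) (ll : List (Char × Int)) : m0 ≤ maxVal c m0 ll := by
  induction ll generalizing m0 with
  | nil => exact le_refl _
  | cons p t ih =>
      simp only [maxVal, List.foldl_cons]
      split_ifs
      · exact le_trans (le_max_left _ _) (ih (max m0 p.2))
      · exact ih m0

lemma le_maxVal_of_mem (c : Char) (m0 n : Int) (ll : List (Char × Int)) (h : (c, n) ∈ ll) :
    n ≤ maxVal c m0 ll := by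
  induction ll generalizing m0 with
  | nil => cases h
  | cons p t ih =>
      rcases List.mem_cons.mp h with h1 | h1
      · simp only [maxVal, List.foldl_cons, ← h1]
        exact le_trans (le_max_right m0 n) (le_self_maxVal c _ t)
      · simp only [maxVal, List.foldl_cons]
        split_ifs
        · exact ih _ h1
        · exact ih _ h1

lemma maxVal_cases (c : Char) (m0 : Int) (ll : List (Char × Int)) :
    maxVal c m0 ll = m0 ∨ ∃ n, (c, n) ∈ ll ∧ maxVal c m0 ll = n := by
  induction ll generalizing m0 with
  | nil => exact Or.inl rfl
  | cons p t ih =>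
      simp only [maxVal, List.foldl_cons]
      split_ifs with hp
      · rcases ih (max m0 p.2) with h1 | ⟨n, hn, he⟩
        · rcases max_cases m0 p.2 with ⟨he2, _⟩ | ⟨he2, _⟩
          · exact Or.inl (h1.trans he2)
          · exact Or.inr ⟨p.2, by simp [List.mem_cons, ← hp], h1.trans he2⟩
        · exact Or.inr ⟨n, List.mem_cons_of_mem _ hn, he⟩
      · rcases ih m0 with h1 | ⟨n, hn, he⟩
        · exact Or.inl h1
        · exact Or.inr ⟨n, List.mem_cons_of_mem _ hn, he⟩

-- max run length of c in l (0 if absent)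
def V (c : Char) (l : List Char) : Int := maxVal c 0 (number2Runs l)

-- a constant block is a substring iff some run of c is at least that long
lemma replicate_infix_iff (c : Char) : ∀ (l : List Char) (k : Nat), 1 ≤ k →
    (List.replicate k c <:+: l ↔ ∃ n, (c, n) ∈ number2Runs l ∧ (k : Int) ≤ n) := by
  intro l
  induction l using number2Runs.induct with
  | case1 =>
      intro k hk
      rw [number2Runs]
      constructor
      · intro h
        have h0 := List.infix_nil.mp h
        have : k = 0 := by simpa using congrArg List.length h0
        omega
      · rintro ⟨n, hn, -⟩; cases hn
  | case2 c0 rest ih =>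
      intro k hk
      have htrep : rest.takeWhile (fun y => y == c0)
          = List.replicate (rest.takeWhile (fun y => y == c0)).length c0 :=
        List.eq_replicate_of_mem (fun b hb => by simpa using List.mem_takeWhile_imp hb)
      set q := (rest.takeWhile (fun y => y == c0)).length with hq
      have hsplit : c0 :: rest
          = List.replicate (q + 1) c0 ++ rest.dropWhile (fun y => y == c0) := by
        rw [List.replicate_succ, List.cons_append]
        congr 1
        conv_lhs => rw [← List.takeWhile_append_dropWhile (p := fun y => y == c0) (l := rest)]
        rw [htrep]
      have hdhead : ∀ x xs, rest.dropWhile (fun y => y == c0) = x :: xs → (x == c0) = false := by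
        intro x xs hxx
        have hh := List.head?_dropWhile_not (fun y => y == c0) rest
        rw [hxx] at hh
        simpa using hh
      have hruns : number2Runs (c0 :: rest)
          = (c0, 1 + (q : Int)) :: number2Runs (rest.dropWhile (fun y => y == c0)) := by
        rw [number2Runs]
      constructor
      · intro h
        obtain ⟨j, hpre⟩ : ∃ j, List.replicate k c <+: (c0 :: rest).drop j :=
          (PySem.Chars.exists_prefix_drop_iff_isIn _ _).mpr
            ((PySem.Chars.isIn_iff_infix _ _).mpr h)
        rw [hsplit, List.drop_append, List.drop_replicate, List.length_replicate] at hpre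
        by_cases hjm : j < q + 1
        · -- the dropped position is still inside the leading block of c0's
          obtain ⟨r, hr⟩ : ∃ r, q + 1 - j = r + 1 := ⟨q - j, by omega⟩
          obtain ⟨k', hk'⟩ : ∃ k', k = k' + 1 := ⟨k - 1, by omega⟩
          have hcc : c = c0 := by
            rw [hr, List.replicate_succ, hk', List.replicate_succ, List.cons_append] at hpre
            exact (List.cons_prefix_cons.mp hpre).1
          refine ⟨1 + (q : Int), by rw [hruns, hcc]; exact List.mem_cons_self, ?_⟩
          by_contra hgt
          push Not at hgt
          have hsplitk : List.replicate k c0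
              = List.replicate (q + 1 - j) c0 ++ List.replicate (k - (q + 1 - j)) c0 := by
            rw [← List.replicate_add]
            congr 1
            have : (k : Int) > 1 + (q : Int) := hgt
            omega
          rw [hcc, hsplitk, List.prefix_append_right_inj] at hpre
          have hj0 : j - (q + 1) = 0 := by omega
          rw [hj0, List.drop_zero] at hpre
          obtain ⟨k'', hk''⟩ : ∃ k'', k - (q + 1 - j) = k'' + 1 := by
            refine ⟨k - (q + 1 - j) - 1, ?_⟩
            have : (k : Int) > 1 + (q : Int) := hgt
            omega
          rw [hk'', List.replicate_succ] at hpre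
          cases hd : rest.dropWhile (fun y => y == c0) with
          | nil =>
              rw [hd] at hpre
              have h0 := List.prefix_nil.mp hpre
              simp at h0
          | cons x xs =>
              rw [hd] at hpre
              have hx := (List.cons_prefix_cons.mp hpre).1
              have hne := hdhead x xs hd
              simp [← hx] at hne
        · -- the substring lies entirely in the remainder: induction hypothesis
          have hq1 : q + 1 - j = 0 := by omega
          rw [hq1] at hpre
          simp only [List.replicate_zero, List.nil_append] at hpre
          have hinf : List.replicate k c <:+: rest.dropWhile (fun y => y == c0) :=
            (PySem.Chars.isIn_iff_infix _ _).mp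
              ((PySem.Chars.exists_prefix_drop_iff_isIn _ _).mp ⟨j - (q + 1), hpre⟩)
          obtain ⟨n, hn, hkn⟩ := (ih k hk).mp hinf
          exact ⟨n, by rw [hruns]; exact List.mem_cons_of_mem _ hn, hkn⟩
      · rintro ⟨n, hn, hkn⟩
        rw [hruns] at hn
        rcases List.mem_cons.mp hn with h1 | h1
        · have hc : c = c0 := congrArg Prod.fst h1
          have hn2 : n = 1 + (q : Int) := congrArg Prod.snd h1
          have hkq : k ≤ q + 1 := by
            have hx : (k : Int) ≤ 1 + (q : Int) := hn2 ▸ hkn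
            omega
          have hpre : List.replicate k c <+: c0 :: rest := by
            rw [hc, hsplit]
            have hsp : List.replicate (q + 1) c0
                = List.replicate k c0 ++ List.replicate (q + 1 - k) c0 := by
              rw [← List.replicate_add]
              congr 1
              omega
            rw [hsp, List.append_assoc]
            exact List.prefix_append _ _
          exact hpre.isInfix
        · have hinf := (ih k hk).mpr ⟨n, h1, hkn⟩
          exact hinf.trans
            (((List.dropWhile_suffix _).trans (List.suffix_cons c0 rest)).isInfix)

-- binary-search correctness for the monotone predicate "replicate k c is a substring"
lemma bsearch_spec (l : List Char) (c : Char) : ∀ (N : Nat) (lo hi : Int),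
    (hi - lo).toNat = N → 1 ≤ lo → lo ≤ hi →
    List.replicate lo.toNat c <:+: l →
    ¬ List.replicate (hi + 1).toNat c <:+: l →
    1 ≤ bsearchRun l c lo hi ∧ bsearchRun l c lo hi ≤ hi ∧
      List.replicate (bsearchRun l c lo hi).toNat c <:+: l ∧
      ¬ List.replicate (bsearchRun l c lo hi + 1).toNat c <:+: l := by
  intro N
  induction N using Nat.strong_induction_on with
  | _ N ih =>
    intro lo hi hN h1 hlh hplo hphi
    rw [bsearchRun]
    by_cases hlt : lo < hi
    · rw [if_pos hlt]
      set mid := PySem.Int.floordiv (lo + hi + 1) 2 with hmid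
      have hb := PySem.Int.floordiv_two_mid_bounds (lo := lo + 1) (hi := hi) (by omega)
      rw [show lo + 1 + hi = lo + hi + 1 by ring] at hb
      by_cases hin : PySem.Chars.isIn (PySem.List.pyRepeat [c] mid) l
      · rw [if_pos hin]
        have hrep : List.replicate mid.toNat c <:+: l := by
          have := (PySem.Chars.isIn_iff_infix _ _).mp hin
          rwa [PySem.List.pyRepeat_singleton] at this
        have hres := ih (hi - mid).toNat (by omega) mid hi rfl (by omega) (by omega) hrep hphi
        exact hres
      · rw [if_neg hin]
        have hnrep : ¬ List.replicate (mid - 1 + 1).toNat c <:+: l := by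
          rw [show mid - 1 + 1 = mid by ring]
          intro hcon
          exact hin ((PySem.Chars.isIn_iff_infix _ _).mpr
            (by rw [PySem.List.pyRepeat_singleton]; exact hcon))
        have hres := ih (mid - 1 - lo).toNat (by omega) lo (mid - 1) rfl h1 (by omega) hplo hnrep
        exact ⟨hres.1, le_trans hres.2.1 (by omega), hres.2.2.1, hres.2.2.2⟩
    · rw [if_neg hlt]
      have heq : lo = hi := le_antisymm hlh (not_lt.mp hlt)
      refine ⟨h1, le_of_eq heq, hplo, ?_⟩
      rw [heq]
      exact hphi

lemma bsr_eq_V (l : List Char) (c : Char) (hc : c ∈ l) :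
    bsearchRun l c 1 (l.length : Int) = V c l := by
  have hlen : 1 ≤ l.length := List.length_pos_of_mem hc
  have hP1 : List.replicate (1 : Int).toNat c <:+: l := by
    obtain ⟨s, t, hst⟩ := List.append_of_mem hc
    exact ⟨s, t, by simp [hst]⟩
  have hPn : ¬ List.replicate ((l.length : Int) + 1).toNat c <:+: l := by
    intro hcon
    have hle := hcon.length_le
    rw [List.length_replicate] at hle
    omega
  obtain ⟨h1, h2, h3, h4⟩ := bsearch_spec l c ((l.length : Int) - 1).toNat 1 (l.length : Int)
    rfl le_rfl (by exact_mod_cast hlen) hP1 hPn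
  have hle1 : bsearchRun l c 1 (l.length : Int) ≤ V c l := by
    obtain ⟨n, hm, hkn⟩ := (replicate_infix_iff c l (bsearchRun l c 1 (l.length : Int)).toNat
      (by omega)).mp h3
    have hv := le_maxVal_of_mem c 0 n _ hm
    unfold V
    omega
  have hle2 : V c l ≤ bsearchRun l c 1 (l.length : Int) := by
    by_contra hlt
    push Not at hlt
    rcases maxVal_cases c 0 (number2Runs l) with hv0 | ⟨n, hm, hvn⟩
    · unfold V at hlt
      omega
    · apply h4
      apply (replicate_infix_iff c l (bsearchRun l c 1 (l.length : Int) + 1).toNat (by omega)).mpr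
      refine ⟨n, hm, ?_⟩
      unfold V at hlt
      omega
  omega

lemma keys_upd (d : PySem.Dict Char Int) (c : Char) (n : Int) (h : 1 ≤ n) :
    (upd d c n).keys = PySem.Set.add d.keys c := by
  by_cases hc : d.contains c
  · have hmem : c ∈ d.keys := (PySem.Dict.contains_iff_mem_keys _ _).mp hc
    by_cases hgt : n > d.getD c 0
    · simp only [upd, if_pos hgt, PySem.Dict.keys_insert_of_contains _ _ hc,
        PySem.Set.add_of_mem hmem]
    · simp only [upd, if_neg hgt, PySem.Set.add_of_mem hmem]
  · have hcf : d.contains c = false := by simpa using hc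
    have hnm : c ∉ d.keys := fun hm => hc ((PySem.Dict.contains_iff_mem_keys _ _).mpr hm)
    have hg : d.getD c 0 = 0 := PySem.Dict.getD_of_not_contains _ _ hcf
    have hgt : n > d.getD c 0 := by omega
    simp only [upd, if_pos hgt, PySem.Dict.keys_insert_of_not_contains _ _ hcf,
      PySem.Set.add_of_not_mem hnm]

lemma keys_foldl_upd (ll : List (Char × Int)) (d : PySem.Dict Char Int)
    (h : ∀ p ∈ ll, 1 ≤ p.2) :
    (ll.foldl (fun d p => upd d p.1 p.2) d).keys = PySem.Set.update d.keys (ll.map (·.1)) := by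
  induction ll generalizing d with
  | nil => simp [PySem.Set.update_nil]
  | cons p t ih =>
      simp only [List.foldl_cons, List.map_cons]
      rw [ih _ (fun q hq => h q (List.mem_cons_of_mem _ hq)),
        keys_upd _ _ _ (h p List.mem_cons_self), PySem.Set.update_cons]

lemma update_const (s : PySem.Set Char) (t : List Char) (h : ∀ x ∈ t, x ∈ s) :
    PySem.Set.update s t = s := by
  induction t generalizing s with
  | nil => exact PySem.Set.update_nil s
  | cons x t ih =>
      rw [PySem.Set.update_cons, PySem.Set.add_of_mem (h x List.mem_cons_self)]
      exact ih s (fun y hy => h y (List.mem_cons_of_mem _ hy))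

lemma runs_chars (l : List Char) : ∀ s : PySem.Set Char,
    PySem.Set.update s ((number2Runs l).map (·.1)) = PySem.Set.update s l := by
  induction l using number2Runs.induct with
  | case1 => intro s; rw [number2Runs]; rfl
  | case2 c rest ih =>
      intro s
      have h1 : PySem.Set.update s ((number2Runs (c :: rest)).map (·.1))
          = PySem.Set.update (PySem.Set.add s c)
              ((number2Runs (rest.dropWhile (fun y => y == c))).map (·.1)) := by
        rw [number2Runs]
        simp only [List.map_cons]
        rw [PySem.Set.update_cons]
      have hmem : ∀ x ∈ rest.takeWhile (fun y => y == c), x ∈ PySem.Set.add s c := by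
        intro x hx
        have hxc : x = c := by simpa using List.mem_takeWhile_imp hx
        exact hxc ▸ (PySem.Set.mem_add _ _ _).mpr (Or.inr rfl)
      have h3 : PySem.Set.update (PySem.Set.add s c) rest
          = PySem.Set.update (PySem.Set.add s c) (rest.dropWhile (fun y => y == c)) := by
        conv_lhs => rw [← List.takeWhile_append_dropWhile (p := fun y => y == c) (l := rest)]
        rw [PySem.Set.update_append, update_const _ _ hmem]
      rw [h1, ih, PySem.Set.update_cons, h3]

lemma foldl_if_max (g : Char → Int) (ks : List Char) (m0 : Int) :
    ks.foldl (fun m k => if m < g k then g k else m) m0 = (ks.map g).foldl max m0 := by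
  induction ks generalizing m0 with
  | nil => rfl
  | cons k t ih =>
      simp only [List.foldl_cons, List.map_cons]
      rw [ih]
      congr 1
      rcases le_total (g k) m0 with h | h
      · simp [not_lt.mpr h, max_eq_left h]
      · rcases lt_or_eq_of_le h with h2 | h2
        · simp [h2, max_eq_right h]
        · simp [h2]

-- ===== VERDICT (by name: the statement is the Claim_ definition above) =====
theorem number_2_spec : Claim_equal_number_2 := by
  intro line _ hpre
  unfold Spec_number_2 number_2 number_2_alt
  obtain ⟨c0, rest, hl⟩ : ∃ c0 rest, line.toList = c0 :: rest := by
    cases hc : line.toList with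
    | nil => exact absurd hc hpre
    | cons a b => exact ⟨a, b, rfl⟩
  have hget : PySem.Str.pyGet? line 0 = some c0 := by
    rw [show (0:Int) = ((0:Nat):Int) from rfl, PySem.Str.pyGet?_natCast, hl]
    rfl
  simp only [hget, hl]
  rw [dicts_eq c0 rest]
  set L : List Char := c0 :: rest with hdefL
  set D := (number2Runs L).foldl (fun d p => upd d p.1 p.2) PySem.Dict.empty with hD
  set DB := (PySem.List.dedup L).foldl
      (fun d c => d.insert c (bsearchRun L c 1 (L.length : Int))) PySem.Dict.empty with hDB
  have hnd : (PySem.List.dedup L).Nodup := PySem.List.nodup_dedup L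
  have hkeysD : D.keys = PySem.List.dedup L := by
    rw [hD, keys_foldl_upd _ _ (runs_pos L), PySem.Dict.keys_empty, runs_chars L,
      PySem.Set.update_nil_left, PySem.List.dedup_eq_ofList]
  have hgdD : ∀ c, D.getD c 0 = V c L := by
    intro c
    rw [hD, getD_foldl_upd, PySem.Dict.getD_empty]
    rfl
  have hbsrV : ∀ c ∈ PySem.List.dedup L, bsearchRun L c 1 (L.length : Int) = V c L := by
    intro c hcmem
    exact bsr_eq_V L c ((PySem.List.mem_dedup L c).mp hcmem)
  have hitems : DB.items
      = (PySem.List.dedup L).map (fun c => (c, bsearchRun L c 1 (L.length : Int))) := by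
    rw [hDB]
    have hfr := PySem.Dict.items_foldl_insert_fresh (PySem.List.dedup L) (fun c => c)
      (fun c => bsearchRun L c 1 (L.length : Int)) PySem.Dict.empty
      (fun a _ => PySem.Dict.contains_empty a) (by rw [List.map_id']; exact hnd)
    simpa using hfr
  have hkeysB : DB.keys = PySem.List.dedup L := by
    simp [PySem.Dict.keys, hitems, Function.comp_def]
  have hgdB : ∀ c ∈ PySem.List.dedup L, DB.getD c 0 = bsearchRun L c 1 (L.length : Int) := by
    intro c hcm
    exact PySem.Dict.getD_of_mem_items DB (by rw [hitems]; exact List.mem_map_of_mem hcm)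
      (by rw [hkeysB]; exact hnd) 0
  have hvalsB : DB.values
      = (PySem.List.dedup L).map (fun c => bsearchRun L c 1 (L.length : Int)) := by
    simp [PySem.Dict.values, hitems, Function.comp_def]
  have hded : PySem.List.dedup L = c0 :: (PySem.Set.ofList rest).discard c0 := by
    rw [hdefL, PySem.List.dedup_eq_ofList, PySem.Set.ofList_cons]
  set rt := (PySem.Set.ofList rest).discard c0 with hrt
  have hmm : ∀ x ∈ PySem.List.dedup L, D.getD x 0 = DB.getD x 0 := by
    intro x hx
    rw [hgdD, hgdB x hx, hbsrV x hx]
  have hVc0 : 1 ≤ V c0 L := by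
    have hmem0 : (c0, 1 + ((rest.takeWhile (fun y => y == c0)).length : Int))
        ∈ number2Runs L := by
      rw [hdefL, number2Runs]
      exact List.mem_cons_self
    have hle := le_maxVal_of_mem c0 0 _ _ hmem0
    have hnn := Int.natCast_nonneg (rest.takeWhile (fun y => y == c0)).length
    unfold V
    omega
  have hc0mem : c0 ∈ PySem.List.dedup L := by
    rw [hded]
    exact List.mem_cons_self
  have hc0g : D.getD c0 0 = bsearchRun L c0 1 (L.length : Int) := by
    rw [hgdD, ← hbsrV c0 hc0mem]
  have hmap : rt.map (fun k => D.getD k 0)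
      = rt.map (fun c => bsearchRun L c 1 (L.length : Int)) :=
    List.map_congr_left (fun x hx => by
      rw [hgdD, ← hbsrV x (by rw [hded]; exact List.mem_cons_of_mem _ hx)])
  have hmA_eq : List.foldl (fun m k => if m < D.getD k 0 then D.getD k 0 else m) 0 D.keys
      = List.foldl max (bsearchRun L c0 1 (L.length : Int))
          (rt.map (fun c => bsearchRun L c 1 (L.length : Int))) := by
    rw [foldl_if_max (fun k => D.getD k 0) D.keys 0, hkeysD, hded, List.map_cons,
      List.foldl_cons]
    have h0 : max 0 (D.getD c0 0) = D.getD c0 0 :=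
      max_eq_right (by rw [hgdD]; omega)
    rw [h0, hmap, hc0g]
  simp only [hvalsB, hded, List.map_cons, PySem.List.max?_id_cons]
  rw [hmA_eq]
  congr 1
  rw [PySem.List.foldl_append_if]
  simp only [List.nil_append, List.map_id']
  congr 1
  rw [hkeysD, hkeysB]
  exact List.filter_congr (fun x hx => by rw [hmm x hx])
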